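-- pv_equiv track=rewrite | github.com/J-81/entropy-from-blast | entropy_from_blast.py | __recategorize
-- ===== SOURCE A (Python) =====
-- def __recategorize(alignment_list, categories):
--     category_list = alignment_list.copy()
--     for i, category in enumerate(categories):
--         category_list = [
--             str(i) if (residue in category)
--             else residue
--             for residue in category_list
--         ]
--     return category_list
-- ===== SOURCE B (Python) =====
-- def __recategorize(alignment_list, categories):
--     # Precompute, back to front, where the label str(i) ultimately lands after the
--     # remaining categories (the chaining collapses into a table lookup); then each
--     # residue needs only its FIRST matching category: answer = resolve[first match].
--     m = len(categories)
--     resolve = [None] * m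
--     for i in range(m - 1, -1, -1):
--         label = str(i)
--         target = label
--         for j in range(i + 1, m):
--             if label in categories[j]:
--                 target = resolve[j]
--                 break
--         resolve[i] = target
--     result = []
--     for residue in alignment_list:
--         out = residue
--         for i, category in enumerate(categories):
--             if residue in category:
--                 out = resolve[i]
--                 break
--         result.append(out)
--     return result
-- ===== Notes on version B (the rewrite author's own statement) =====
-- stated objective: alternative
-- what changed: Instead of rebuilding the list once per category with cascading re-matches, B precomputes back-to-front a resolve table telling where each category label str(i) ultimately lands after the later categories, then maps each residue to resolve[first matching category] (or itself), so the per-residue chain becomes a first-match scan plus one table lookup.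
import Mathlib
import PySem

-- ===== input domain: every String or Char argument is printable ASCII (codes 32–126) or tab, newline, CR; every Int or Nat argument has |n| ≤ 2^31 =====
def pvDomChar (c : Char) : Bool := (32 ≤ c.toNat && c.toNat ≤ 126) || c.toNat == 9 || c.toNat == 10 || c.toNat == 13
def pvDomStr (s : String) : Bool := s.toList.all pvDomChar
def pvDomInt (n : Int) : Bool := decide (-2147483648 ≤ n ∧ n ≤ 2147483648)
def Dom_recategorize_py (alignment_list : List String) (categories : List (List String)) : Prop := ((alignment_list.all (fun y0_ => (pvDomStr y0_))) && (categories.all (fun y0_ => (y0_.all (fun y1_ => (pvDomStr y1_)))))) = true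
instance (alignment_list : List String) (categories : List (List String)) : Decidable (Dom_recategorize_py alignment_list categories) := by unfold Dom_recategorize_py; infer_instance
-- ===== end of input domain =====

-- B replaces A's repeated whole-list rebuilds by a back-to-front precomputed resolve table
-- (where each category label ultimately lands) plus a first-match lookup per residue (alternative algorithm).


-- ===== PORT A =====
-- for i, category in enumerate(categories): category_list = [str(i) if residue in category else residue for residue in category_list]
def recategorize_py (alignment_list : List String) (categories : List (List String)) : List String :=
  (PySem.List.enumerate categories).foldl
    (fun category_list (p : Int × List String) =>
      category_list.map (fun residue => if residue ∈ p.2 then PySem.Int.toStr p.1 else residue))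
    alignment_list

-- ===== PORT B =====
-- first match in a (category, target) table: break at the first containing category, else keep v
def pvFirstTarget (v : String) : List (List String × String) → String
  | [] => v
  | (c, r) :: rest => if v ∈ c then r else pvFirstTarget v rest

-- back-to-front resolve table: resolve[i] = where str(i) lands after categories i+1..m-1
def pvResolve (i : Int) : List (List String) → List String
  | [] => []
  | _c :: rest =>
      let tail := pvResolve (i + 1) rest
      pvFirstTarget (PySem.Int.toStr i) (rest.zip tail) :: tail

def recategorize_py_alt (alignment_list : List String) (categories : List (List String)) : List String :=
  let tab := pvResolve 0 categories
  alignment_list.map (fun residue => pvFirstTarget residue (categories.zip tab))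

-- ===== PRECONDITION & SPEC =====
def Spec_recategorize_py (alignment_list : List String) (categories : List (List String)) (out : List String) : Prop := out = recategorize_py_alt alignment_list categories
instance (alignment_list : List String) (categories : List (List String)) (out : List String) : Decidable (Spec_recategorize_py alignment_list categories out) := by unfold Spec_recategorize_py; infer_instance

-- ===== CLAIM (what is proved, stated in full; the proofs are below) =====
def Claim_equal_recategorize_py : Prop := ∀ (alignment_list : List String) (categories : List (List String)), Dom_recategorize_py alignment_list categories → Spec_recategorize_py alignment_list categories (recategorize_py alignment_list categories)

-- ===== LEMMAS AND PROOFS =====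

-- the per-element chained relabelling A performs, with explicit starting index
def pvChain (i : Int) : List (List String) → String → String
  | [], v => v
  | c :: rest, v => pvChain (i + 1) rest (if v ∈ c then PySem.Int.toStr i else v)

-- folding elementwise maps over a list commutes with mapping the pointwise fold
theorem foldl_map_comm {α β : Type} (f : β → α → α) (ps : List β) (xs : List α) :
    ps.foldl (fun cl p => cl.map (f p)) xs = xs.map (fun x => ps.foldl (fun v p => f p v) x) := by
  induction ps generalizing xs with
  | nil => simp
  | cons p ps ih => simp [List.foldl_cons, ih, List.map_map, Function.comp]

-- A's per-element fold over enumerated categories is pvChain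
theorem foldl_enumerate_eq_chain (cats : List (List String)) (s : Int) (v : String) :
    (PySem.List.enumerate cats s).foldl
      (fun value (p : Int × List String) => if value ∈ p.2 then PySem.Int.toStr p.1 else value) v
      = pvChain s cats v := by
  induction cats generalizing s v with
  | nil => simp [PySem.List.enumerate_nil, pvChain]
  | cons c rest ih => simp [PySem.List.enumerate_cons, pvChain, ih]

-- the chain collapses to a first-match lookup in the resolve table
theorem chain_eq_firstTarget (cats : List (List String)) (i : Int) (v : String) :
    pvChain i cats v = pvFirstTarget v (cats.zip (pvResolve i cats)) := by
  induction cats generalizing i v with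
  | nil => simp [pvChain, pvFirstTarget]
  | cons c rest ih =>
    simp only [pvChain, pvResolve, List.zip_cons_cons, pvFirstTarget]
    by_cases h : v ∈ c
    · simp [h, ih]
    · simp [h, ih]

-- ===== VERDICT (by name: the statement is the Claim_ definition above) =====
theorem recategorize_py_spec : Claim_equal_recategorize_py := by
  intro alignment_list categories _
  unfold Spec_recategorize_py recategorize_py recategorize_py_alt
  rw [foldl_map_comm]
  simp only [foldl_enumerate_eq_chain, chain_eq_firstTarget]
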